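-- pv_equiv track=rewrite | github.com/Vishal1889/ci-analyzer-tool | src/report_generators/report_types/neo_to_cf_migration.py | _extract_cn
-- ===== SOURCE A (Python) =====
-- def _extract_cn(dn: str) -> str:
--     """Extract CN (Common Name) from Distinguished Name"""
--     if not dn:
--         return 'Unknown'
--
--     # Look for CN= in the DN string
--     parts = dn.split(',')
--     for part in parts:
--         part = part.strip()
--         if part.startswith('CN='):
--             return part[3:]  # Remove 'CN=' prefix
--
--     return dn  # Return full DN if CN not found
-- ===== SOURCE B (Python) =====
-- def _extract_cn(dn: str) -> str:
--     """Extract CN (Common Name) from Distinguished Name.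
--
--     Single character-level scan over the string (no split/strip lists):
--     at each segment start skip whitespace, test for the 'CN=' prefix, and
--     either slice the value out up to the next comma (trailing whitespace
--     trimmed) or jump to the next comma.
--     """
--     if not dn:
--         return 'Unknown'
--     i, n = 0, len(dn)
--     while i < n:
--         j = i
--         while j < n and dn[j].isspace():
--             j += 1
--         if dn.startswith('CN=', j):
--             k = j + 3
--             end = dn.find(',', k)
--             if end == -1:
--                 end = n
--             return dn[k:end].rstrip()
--         c = dn.find(',', i)
--         if c == -1:
--             return dn
--         i = c + 1
--     return dn
-- ===== Notes on version B (the rewrite author's own statement) =====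
-- stated objective: alternative
-- what changed: Replaces split(',') into a list of segments plus per-segment strip()/startswith with a single character-level index scan that skips leading whitespace, tests the 'CN=' prefix in place, and slices the value out up to the next comma (rstrip on the value only), building no intermediate lists.
import Mathlib
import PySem

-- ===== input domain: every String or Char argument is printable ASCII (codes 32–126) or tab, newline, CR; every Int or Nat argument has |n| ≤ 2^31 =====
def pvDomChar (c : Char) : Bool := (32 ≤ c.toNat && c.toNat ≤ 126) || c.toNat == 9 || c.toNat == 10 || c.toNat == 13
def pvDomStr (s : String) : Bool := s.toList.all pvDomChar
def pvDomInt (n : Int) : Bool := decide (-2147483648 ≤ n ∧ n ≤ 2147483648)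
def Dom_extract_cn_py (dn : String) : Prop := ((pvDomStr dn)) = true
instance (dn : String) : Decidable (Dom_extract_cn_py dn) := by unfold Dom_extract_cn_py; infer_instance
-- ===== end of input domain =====

-- B replaces A's split-into-segments-then-strip loop by a single character-level
-- scan of the string (alternative decomposition; same cost, no intermediate lists).

-- ===== PORT A =====
-- the `for part in parts` loop: first stripped segment starting with 'CN=' wins
def pvALoop (dn : List Char) : List (List Char) → List Char
  | [] => dn                                                -- return dn  (CN not found)
  | p :: rest =>
    let p := PySem.Chars.strip p                            -- part = part.strip()
    if PySem.Chars.startswith p ['C', 'N', '='] then        -- part.startswith('CN=')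
      PySem.List.slice p (some 3) none                      -- return part[3:]
    else pvALoop dn rest

def extract_cn_py (dn : String) : String :=
  if dn = "" then "Unknown"                                 -- if not dn: return 'Unknown'
  else
    let parts := PySem.Chars.splitOn dn.toList [',']        -- parts = dn.split(',')
    String.ofList (pvALoop dn.toList parts)

-- ===== PORT B =====
-- B's while-loop over the index i, transcribed as recursion over the suffix of the
-- string that starts at i (Python's find(',', k)/dn[k:end] become takeWhile/dropWhile
-- on that suffix: between i and j there is only whitespace, hence no comma).
def pvBScan (dn : List Char) (rest : List Char) : List Char :=
  let r := rest.dropWhile PySem.Chars.isspace               -- skip whitespace at segment start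
  if PySem.Chars.startswith r ['C', 'N', '='] then          -- dn.startswith('CN=', j)
    PySem.Chars.rstrip ((r.drop 3).takeWhile (fun c => c ≠ ','))  -- dn[k:end].rstrip()
  else
    match h : rest.dropWhile (fun c => c ≠ ',') with  -- c = dn.find(',', i)
    | [] => dn                                              -- no comma: return dn
    | _ :: t => pvBScan dn t                                -- i = c + 1
termination_by rest.length
decreasing_by
  have hle := List.length_dropWhile_le (fun c => c ≠ ',') rest
  rw [h] at hle; simpa using Nat.lt_of_lt_of_le (Nat.lt_succ_self _) hle

def extract_cn_py_alt (dn : String) : String :=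
  if dn = "" then "Unknown"
  else String.ofList (pvBScan dn.toList dn.toList)

-- ===== PRECONDITION & SPEC =====
def Spec_extract_cn_py (dn : String) (out : String) : Prop := out = extract_cn_py_alt dn
instance (dn : String) (out : String) : Decidable (Spec_extract_cn_py dn out) := by unfold Spec_extract_cn_py; infer_instance

-- ===== CLAIM (what is proved, stated in full; the proofs are below) =====
def Claim_equal_extract_cn_py : Prop := ∀ (dn : String), Dom_extract_cn_py dn → Spec_extract_cn_py dn (extract_cn_py dn)

-- ===== LEMMAS AND PROOFS =====

-- a simple structural characterisation of splitOn on a one-char separator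
def pvSplit : List Char → List (List Char)
  | [] => [[]]
  | c :: t =>
    if c = ',' then [] :: pvSplit t
    else
      match pvSplit t with
      | h :: r => (c :: h) :: r
      | [] => [[c]]

lemma pvSplit_ne_nil (s : List Char) : pvSplit s ≠ [] := by
  cases s with
  | nil => simp [pvSplit]
  | cons c t =>
    simp only [pvSplit]
    split_ifs
    · simp
    · cases pvSplit t <;> simp

def pvConsHead (pre : List Char) : List (List Char) → List (List Char)
  | [] => [pre]
  | h :: r => (pre ++ h) :: r

lemma pv_go_spec : ∀ (fuel : Nat) (l cur : List Char) (acc : List (List Char)),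
    l.length ≤ fuel →
    PySem.Chars.splitOn.go [','] fuel l cur acc = acc.reverse ++ pvConsHead cur.reverse (pvSplit l) := by
  intro fuel
  induction fuel with
  | zero =>
    intro l cur acc hl
    have : l = [] := List.length_eq_zero_iff.mp (Nat.le_zero.mp hl)
    subst this
    simp [PySem.Chars.splitOn.go, pvSplit, pvConsHead]
  | succ f ih =>
    intro l cur acc hl
    cases l with
    | nil => simp [PySem.Chars.splitOn.go, pvSplit, pvConsHead]
    | cons c rest =>
      rw [PySem.Chars.splitOn.go]
      by_cases hc : c = ','
      · subst hc
        have hpre : [','].isPrefixOf (',' :: rest) = true := by simp [List.isPrefixOf]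
        rw [if_pos hpre]
        have : List.drop (List.length [',']) (',' :: rest) = rest := by simp
        rw [this, ih rest [] (cur.reverse :: acc) (by simpa using Nat.le_of_succ_le_succ hl)]
        have hne := pvSplit_ne_nil rest
        cases hs : pvSplit rest with
        | nil => exact absurd hs hne
        | cons h r =>
          simp [pvSplit, pvConsHead, hs]
      · have hpre : [','].isPrefixOf (c :: rest) = false := by
          simp [List.isPrefixOf]
          exact fun h => hc h.symm
        rw [if_neg (by simp [hpre])]
        rw [ih rest (c :: cur) acc (by simpa using Nat.le_of_succ_le_succ hl)]
        have hne := pvSplit_ne_nil rest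
        cases hs : pvSplit rest with
        | nil => exact absurd hs hne
        | cons h r =>
          simp [pvSplit, pvConsHead, hs, hc]

lemma pv_splitOn_eq (s : List Char) : PySem.Chars.splitOn s [','] = pvSplit s := by
  unfold PySem.Chars.splitOn
  rw [pv_go_spec (s.length + 1) s [] [] (Nat.le_succ _)]
  have hne := pvSplit_ne_nil s
  cases hs : pvSplit s with
  | nil => exact absurd hs hne
  | cons h r => simp [pvConsHead]

lemma pv_dropWhile_takeWhile_comm (p q : Char → Bool) (h : ∀ c, p c = true → q c = true) :
    ∀ s : List Char, (s.takeWhile q).dropWhile p = (s.dropWhile p).takeWhile q := by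
  intro s
  induction s with
  | nil => rfl
  | cons c t ih =>
    by_cases hq : q c = true
    · by_cases hp : p c = true
      · simp [hq, hp, ih]
      · simp [hq, hp]
    · have hp : p c = false := by
        cases hpc : p c
        · rfl
        · exact absurd (h c hpc) hq
      simp [hq, hp]

lemma pv_rstrip_cons (c : Char) (l : List Char) (h : PySem.Chars.isspace c = false) :
    PySem.Chars.rstrip (c :: l) = c :: PySem.Chars.rstrip l := by
  unfold PySem.Chars.rstrip
  rw [List.reverse_cons, List.dropWhile_append]
  by_cases he : (List.dropWhile PySem.Chars.isspace l.reverse).isEmpty = true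
  · rw [if_pos he]
    simp [List.isEmpty_iff.mp he, h]
  · rw [if_neg he]
    simp

lemma pv_rstrip_prefix (l : List Char) : PySem.Chars.rstrip l <+: l := by
  unfold PySem.Chars.rstrip
  have := List.dropWhile_suffix (l := l.reverse) PySem.Chars.isspace
  have h2 := List.reverse_prefix.mpr this
  simpa using h2

lemma pvSplit_no_comma (s : List Char) (h : s.dropWhile (fun c => c ≠ ',') = []) :
    pvSplit s = [s] := by
  induction s with
  | nil => rfl
  | cons c t ih =>
    rw [List.dropWhile_cons] at h
    by_cases hc : c = ','
    · simp [hc] at h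
    · simp only [pvSplit, if_neg hc]
      rw [ih (by simpa [hc] using h)]
  
lemma pvSplit_comma (s : List Char) (c : Char) (t : List Char)
    (h : s.dropWhile (fun c => c ≠ ',') = c :: t) :
    pvSplit s = (s.takeWhile (fun c => c ≠ ',')) :: pvSplit t := by
  induction s with
  | nil => simp at h
  | cons a s' ih =>
    rw [List.dropWhile_cons] at h
    by_cases ha : a = ','
    · simp only [ha] at h ⊢
      simp at h
      rw [pvSplit]
      simp [h.2]
    · simp only [decide_eq_true_eq] at h
      rw [if_pos (by simpa using ha)] at h
      rw [List.takeWhile_cons, if_pos (by simpa using ha)]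
      simp only [pvSplit, if_neg ha]
      rw [ih h]

lemma pv_strip_take (s : List Char) :
    PySem.Chars.strip (s.takeWhile (fun c => c ≠ ',')) =
    PySem.Chars.rstrip ((s.dropWhile PySem.Chars.isspace).takeWhile (fun c => c ≠ ',')) := by
  unfold PySem.Chars.strip PySem.Chars.lstrip
  rw [pv_dropWhile_takeWhile_comm PySem.Chars.isspace (fun c => c ≠ ',')]
  intro c hc
  by_cases h : c = ','
  · subst h; exact absurd hc (by decide)
  · simp [h]

lemma pv_rstrip_take_CNeq (v : List Char) :
    PySem.Chars.rstrip ((['C', 'N', '='] ++ v).takeWhile (fun c => c ≠ ',')) =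
    'C' :: 'N' :: '=' :: PySem.Chars.rstrip (v.takeWhile (fun c => c ≠ ',')) := by
  have h1 : (['C', 'N', '='] ++ v).takeWhile (fun c => c ≠ ',') =
      'C' :: 'N' :: '=' :: v.takeWhile (fun c => c ≠ ',') := by
    simp
  rw [h1, pv_rstrip_cons _ _ (by decide), pv_rstrip_cons _ _ (by decide),
      pv_rstrip_cons _ _ (by decide)]

lemma pv_prefix_iff (r : List Char) :
    PySem.Chars.startswith (PySem.Chars.rstrip (r.takeWhile (fun c => c ≠ ','))) ['C', 'N', '='] =
    PySem.Chars.startswith r ['C', 'N', '='] := by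
  by_cases h : PySem.Chars.startswith r ['C', 'N', '='] = true
  · rw [h]
    obtain ⟨v, hv⟩ := (PySem.Chars.startswith_iff _ _).mp h
    rw [PySem.Chars.startswith_iff, ← hv, pv_rstrip_take_CNeq]
    exact ⟨_, rfl⟩
  · rw [Bool.eq_false_iff.mpr h, Bool.eq_false_iff]
    intro hc
    apply h
    rw [PySem.Chars.startswith_iff] at hc ⊢
    exact (hc.trans (pv_rstrip_prefix _)).trans (List.takeWhile_prefix _)

lemma pv_value (r : List Char) (h : ['C', 'N', '='] <+: r) :
    PySem.List.slice (PySem.Chars.rstrip (r.takeWhile (fun c => c ≠ ','))) (some 3) none =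
    PySem.Chars.rstrip ((r.drop 3).takeWhile (fun c => c ≠ ',')) := by
  obtain ⟨v, hv⟩ := h
  subst hv
  rw [pv_rstrip_take_CNeq, PySem.List.slice_from _ (by norm_num)]
  simp

lemma pv_main_aux : ∀ (n : Nat) (s : List Char), s.length ≤ n →
    ∀ dn, pvALoop dn (pvSplit s) = pvBScan dn s := by
  intro n
  induction n with
  | zero =>
    intro s hs dn
    have : s = [] := List.length_eq_zero_iff.mp (Nat.le_zero.mp hs)
    subst this
    rw [pvBScan]
    simp [pvALoop, pvSplit, PySem.Chars.strip, PySem.Chars.lstrip, PySem.Chars.rstrip,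
      PySem.Chars.startswith]
  | succ n ih =>
    intro s hs dn
    rw [pvBScan]
    have hhead : ∀ rest, pvALoop dn ((s.takeWhile (fun c => c ≠ ',')) :: rest) =
        if PySem.Chars.startswith (s.dropWhile PySem.Chars.isspace) ['C', 'N', '='] then
          PySem.List.slice
            (PySem.Chars.rstrip ((s.dropWhile PySem.Chars.isspace).takeWhile (fun c => c ≠ ',')))
            (some 3) none
        else pvALoop dn rest := by
      intro rest
      simp only [pvALoop, pv_strip_take, pv_prefix_iff]
    by_cases hpre : PySem.Chars.startswith (s.dropWhile PySem.Chars.isspace) ['C', 'N', '='] = true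
    · have hval := pv_value _ ((PySem.Chars.startswith_iff _ _).mp hpre)
      cases hd : s.dropWhile (fun c => c ≠ ',') with
      | nil =>
        have hts : s.takeWhile (fun c => c ≠ ',') = s := by
          conv_rhs => rw [← List.takeWhile_append_dropWhile (p := fun c => c ≠ ',') (l := s)]
          rw [hd, List.append_nil]
        have hgoal : pvSplit s = [s.takeWhile (fun c => c ≠ ',')] := by
          rw [pvSplit_no_comma s hd, hts]
        rw [hgoal, hhead, if_pos hpre, hpre, if_pos rfl, hval]
      | cons c t =>
        rw [pvSplit_comma s c t hd, hhead, if_pos hpre, hpre, if_pos rfl, hval]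
    · have hpre' : PySem.Chars.startswith (s.dropWhile PySem.Chars.isspace) ['C', 'N', '='] = false :=
        Bool.eq_false_iff.mpr hpre
      rw [hpre', if_neg (by simp)]
      cases hd : s.dropWhile (fun c => c ≠ ',') with
      | nil =>
        have hts : s.takeWhile (fun c => c ≠ ',') = s := by
          conv_rhs => rw [← List.takeWhile_append_dropWhile (p := fun c => c ≠ ',') (l := s)]
          rw [hd, List.append_nil]
        have hgoal : pvSplit s = [s.takeWhile (fun c => c ≠ ',')] := by
          rw [pvSplit_no_comma s hd, hts]
        rw [hgoal, hhead, hpre', if_neg (by simp)]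
        simp [pvALoop]
      | cons c t =>
        rw [pvSplit_comma s c t hd, hhead, hpre', if_neg (by simp)]
        have hlt : t.length ≤ n := by
          have hle := List.length_dropWhile_le (fun c => c ≠ ',') s
          rw [hd] at hle
          simp only [List.length_cons] at hle
          omega
        exact ih t hlt dn

lemma pv_main : ∀ (s dn : List Char), pvALoop dn (pvSplit s) = pvBScan dn s := by
  intro s dn
  exact pv_main_aux s.length s le_rfl dn

-- ===== VERDICT (by name: the statement is the Claim_ definition above) =====
theorem extract_cn_py_spec : Claim_equal_extract_cn_py := by
  intro dn _
  unfold Spec_extract_cn_py extract_cn_py extract_cn_py_alt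
  split_ifs with h
  · rfl
  · rw [pv_splitOn_eq]
    show String.ofList (pvALoop dn.toList (pvSplit dn.toList)) = _
    rw [pv_main]
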